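-- pv_equiv track=rewrite | github.com/sanya-setia/document-access-sharepoint | scripts/export_library_metadata.py | pick_fields_for_csv
-- ===== SOURCE A (Python) =====
-- from typing import Dict, Any, List, Optional
--
-- def pick_fields_for_csv(items: List[Dict[str, Any]], requested: Optional[List[str]]) -> List[str]:
--     """
--     Decide which field names to write based on data + user request.
--     We always include FileLeafRef (name) when present.
--     """
--     # Gather all field keys seen
--     keys = set()
--     for it in items[:100]:  # sample first page(s)
--         fld = it.get("fields") or {}
--         keys.update(fld.keys())
--
--     # Always-good defaults
--     defaults = ["FileLeafRef", "Title", "Verified", "Accounts", "Region", "Modified", "Editor"]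
--
--     if requested:
--         base = requested
--     else:
--         base = [k for k in defaults if k in keys]
--
--     # Ensure FileLeafRef is first if present
--     if "FileLeafRef" in keys and "FileLeafRef" not in base:
--         base = ["FileLeafRef"] + base
--
--     # Always include webUrl column (added separately)
--     return base
-- ===== SOURCE B (Python) =====
-- def pick_fields_for_csv(items, requested):
--     """Candidate-driven: test each default name against the sample directly,
--     instead of gathering the full key set."""
--     defaults = ["FileLeafRef", "Title", "Verified", "Accounts", "Region", "Modified", "Editor"]
--     sample = items[:100]
--     present = [k for k in defaults
--                if any(k in (it.get("fields") or {}) for it in sample)]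
--     base = requested if requested else present
--     if "FileLeafRef" in present and "FileLeafRef" not in base:
--         base = ["FileLeafRef"] + base
--     return base
-- ===== Notes on version B (the rewrite author's own statement) =====
-- stated objective: simpler
-- what changed: Instead of gathering the full key set of the sampled items into a set and testing defaults against it, B scans the sample once per default candidate name and collects only the present candidates, never materialising the key set.
import Mathlib
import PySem

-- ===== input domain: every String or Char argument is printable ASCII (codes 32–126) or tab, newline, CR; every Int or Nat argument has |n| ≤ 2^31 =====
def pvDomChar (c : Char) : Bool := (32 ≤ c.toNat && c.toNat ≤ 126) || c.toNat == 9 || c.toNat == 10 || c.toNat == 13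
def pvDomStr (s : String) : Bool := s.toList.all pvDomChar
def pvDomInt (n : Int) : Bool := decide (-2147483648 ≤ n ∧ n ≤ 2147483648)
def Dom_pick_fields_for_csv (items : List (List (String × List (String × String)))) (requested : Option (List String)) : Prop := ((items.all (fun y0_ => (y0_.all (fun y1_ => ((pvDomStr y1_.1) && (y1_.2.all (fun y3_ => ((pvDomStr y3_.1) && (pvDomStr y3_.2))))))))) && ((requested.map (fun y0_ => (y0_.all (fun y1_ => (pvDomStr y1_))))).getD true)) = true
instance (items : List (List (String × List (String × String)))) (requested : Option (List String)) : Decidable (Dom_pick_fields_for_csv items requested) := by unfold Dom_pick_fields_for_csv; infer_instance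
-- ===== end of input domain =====

-- B replaces A's gather-all-keys set with a candidate-driven scan: for each default
-- name it checks the sample directly (objective: simpler — no key set is built).

-- ===== PORT A =====
-- fields of one item: it.get("fields") or {}
def pvFieldsA (it : List (String × List (String × String))) : List (String × String) :=
  ((PySem.Dict.mk it).get? "fields").getD []

def pick_fields_for_csv (items : List (List (String × List (String × String)))) (requested : Option (List String)) : List String :=
  -- keys = set(); for it in items[:100]: keys.update((it.get("fields") or {}).keys())
  let keys : PySem.Set String :=
    (PySem.List.slice items none (some 100)).foldl
      (fun s it => PySem.Set.update s ((pvFieldsA it).map Prod.fst)) PySem.Set.empty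
  let defaults := ["FileLeafRef", "Title", "Verified", "Accounts", "Region", "Modified", "Editor"]
  -- if requested: base = requested else: base = [k for k in defaults if k in keys]
  let base :=
    match requested with
    | some r => if r = [] then defaults.filter (fun k => PySem.Set.contains keys k) else r
    | none => defaults.filter (fun k => PySem.Set.contains keys k)
  -- if "FileLeafRef" in keys and "FileLeafRef" not in base: base = ["FileLeafRef"] + base
  if PySem.Set.contains keys "FileLeafRef" && !(base.contains "FileLeafRef") then
    "FileLeafRef" :: base
  else base

-- ===== PORT B =====
def pick_fields_for_csv_alt (items : List (List (String × List (String × String)))) (requested : Option (List String)) : List String :=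
  let defaults := ["FileLeafRef", "Title", "Verified", "Accounts", "Region", "Modified", "Editor"]
  let sample := items.take 100
  -- present = [k for k in defaults if any(k in (it.get("fields") or {}) for it in sample)]
  let present := defaults.filter
    (fun k => sample.any (fun it =>
      (((PySem.Dict.mk it).get? "fields").getD []).any (fun p => p.1 == k)))
  let base :=
    match requested with
    | some r => if r = [] then present else r
    | none => present
  if present.contains "FileLeafRef" && !(base.contains "FileLeafRef") then
    "FileLeafRef" :: base
  else base

-- ===== PRECONDITION & SPEC =====
def Spec_pick_fields_for_csv (items : List (List (String × List (String × String)))) (requested : Option (List String)) (out : List String) : Prop := out = pick_fields_for_csv_alt items requested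
instance (items : List (List (String × List (String × String)))) (requested : Option (List String)) (out : List String) : Decidable (Spec_pick_fields_for_csv items requested out) := by unfold Spec_pick_fields_for_csv; infer_instance

-- ===== CLAIM (what is proved, stated in full; the proofs are below) =====
def Claim_equal_pick_fields_for_csv : Prop := ∀ (items : List (List (String × List (String × String)))) (requested : Option (List String)), Dom_pick_fields_for_csv items requested → Spec_pick_fields_for_csv items requested (pick_fields_for_csv items requested)

-- ===== LEMMAS AND PROOFS =====

-- membership in A's key-gathering fold
lemma mem_foldl_update {α : Type} [BEq α] [LawfulBEq α] {β : Type}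
    (f : β → List α) (l : List β) (s : PySem.Set α) (x : α) :
    x ∈ l.foldl (fun s it => PySem.Set.update s (f it)) s ↔ x ∈ s ∨ ∃ it ∈ l, x ∈ f it := by
  induction l generalizing s with
  | nil => simp
  | cons h t ih =>
    simp [List.foldl_cons, ih, PySem.Set.mem_update]
    tauto

-- "x in ds.filter p" as a Bool, when x is known to be in ds
lemma contains_filter_of_mem {x : String} {ds : List String} (p : String → Bool) (h : x ∈ ds) :
    (ds.filter p).contains x = p x := by
  by_cases hp : p x = true
  · simp [List.mem_filter, h, hp]
  · simp only [Bool.not_eq_true] at hp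
    simp [List.mem_filter, hp]

-- A's "k in keys" test equals B's candidate scan over the sample
lemma keys_contains_iff (items : List (List (String × List (String × String)))) (k : String) :
    PySem.Set.contains
      ((PySem.List.slice items none (some 100)).foldl
        (fun s it => PySem.Set.update s ((pvFieldsA it).map Prod.fst)) PySem.Set.empty) k
    = (items.take 100).any (fun it =>
        (((PySem.Dict.mk it).get? "fields").getD []).any (fun p => p.1 == k)) := by
  have hslice : PySem.List.slice items none (some (100 : Int)) = items.take 100 := by
    simpa using PySem.List.slice_to_natCast items 100
  rw [hslice, Bool.eq_iff_iff]
  simp only [PySem.Set.contains_iff, mem_foldl_update, List.any_eq_true]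
  constructor
  · rintro (h | ⟨it, hit, hk⟩)
    · simp [PySem.Set.empty] at h
    · exact ⟨it, hit, by
        rcases List.mem_map.mp hk with ⟨p, hp, rfl⟩
        exact ⟨p, hp, by simp [pvFieldsA] at hp ⊢⟩⟩
  · rintro ⟨it, hit, p, hp, hpk⟩
    refine Or.inr ⟨it, hit, ?_⟩
    have : p.1 = k := by simpa using hpk
    exact this ▸ List.mem_map_of_mem hp

theorem pick_fields_for_csv_agree (items : List (List (String × List (String × String))))
    (requested : Option (List String)) :
    pick_fields_for_csv items requested = pick_fields_for_csv_alt items requested := by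
  unfold pick_fields_for_csv pick_fields_for_csv_alt
  simp only [keys_contains_iff]
  rw [contains_filter_of_mem _ (by simp)]

-- ===== VERDICT (by name: the statement is the Claim_ definition above) =====
theorem pick_fields_for_csv_spec : Claim_equal_pick_fields_for_csv := by
  intro items requested _
  exact pick_fields_for_csv_agree items requested
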